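-- pv_equiv track=rewrite | github.com/nkukarl/leetcode | word_pattern.py | check_surjective
-- ===== SOURCE A (Python) =====
-- def check_surjective(p, s):
--     summary = {}
--     for pp, ss in zip(p, s):
--         if pp in summary:
--             if ss != summary[pp]:
--                 return False
--         else:
--             summary[pp] = ss
--
--     return True
-- ===== SOURCE B (Python) =====
-- def check_surjective(p, s):
--     groups = {}
--     for pp, ss in zip(p, s):
--         groups[pp] = groups.get(pp, []) + [ss]
--     return all(len(set(vals)) <= 1 for vals in groups.values())
-- ===== Notes on version B (the rewrite author's own statement) =====
-- stated objective: alternative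
-- what changed: Replaces the eager single-pass first-value-map check with early return by a two-phase computation: first group all string values per pattern key into a dict of lists, then verify every key's value set has at most one distinct element.
import Mathlib
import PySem

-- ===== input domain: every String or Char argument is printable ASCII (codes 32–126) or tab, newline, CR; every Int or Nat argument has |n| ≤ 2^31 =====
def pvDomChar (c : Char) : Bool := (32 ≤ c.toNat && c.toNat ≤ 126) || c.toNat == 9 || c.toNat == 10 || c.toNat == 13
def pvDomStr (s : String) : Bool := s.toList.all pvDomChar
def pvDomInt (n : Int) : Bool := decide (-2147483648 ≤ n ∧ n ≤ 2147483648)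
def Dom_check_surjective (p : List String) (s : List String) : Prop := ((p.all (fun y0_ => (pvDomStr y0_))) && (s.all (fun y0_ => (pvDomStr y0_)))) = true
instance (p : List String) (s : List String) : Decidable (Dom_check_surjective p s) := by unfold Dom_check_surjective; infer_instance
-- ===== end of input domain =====

-- B replaces A's eager single-pass first-value check (early return) by a two-phase
-- build-index-then-verify computation; same return value, no speed claim.

-- ===== PORT A =====
-- A's loop over zip(p, s) with the dict `summary`; `pp in summary` + `summary[pp]`
-- is ported as one `get?` match (exact: the lookup is only read when the key is present).
def checkLoop : List (String × String) → PySem.Dict String String → Bool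
  | [], _ => true
  | pr :: rest, summary =>
    match summary.get? pr.1 with
    | some v => if pr.2 ≠ v then false else checkLoop rest summary
    | none => checkLoop rest (summary.insert pr.1 pr.2)

def check_surjective (p : List String) (s : List String) : Bool :=
  checkLoop (p.zip s) PySem.Dict.empty

-- ===== PORT B =====
-- Phase 1: groups[pp] = groups.get(pp, []) + [ss]  (= Dict.modify pr.1 [] (· ++ [pr.2]))
def groupVals (pairs : List (String × String)) : PySem.Dict String (List String) :=
  pairs.foldl (fun d pr => d.modify pr.1 [] (· ++ [pr.2])) PySem.Dict.empty

-- Phase 2: all(len(set(vals)) <= 1 for vals in groups.values())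
def check_surjective_alt (p : List String) (s : List String) : Bool :=
  ((groupVals (p.zip s)).values).all (fun vals => (PySem.Set.ofList vals).length ≤ 1)

-- ===== PRECONDITION & SPEC =====
def Spec_check_surjective (p : List String) (s : List String) (out : Bool) : Prop := out = check_surjective_alt p s
instance (p : List String) (s : List String) (out : Bool) : Decidable (Spec_check_surjective p s out) := by unfold Spec_check_surjective; infer_instance

-- ===== CLAIM (what is proved, stated in full; the proofs are below) =====
def Claim_equal_check_surjective : Prop := ∀ (p : List String) (s : List String), Dom_check_surjective p s → Spec_check_surjective p s (check_surjective p s)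

-- ===== LEMMAS AND PROOFS =====

-- both programs decide this consistency property of the zipped pair list
def Consistent (pairs : List (String × String)) : Prop :=
  ∀ a ∈ pairs, ∀ b ∈ pairs, a.1 = b.1 → a.2 = b.2

lemma checkLoop_iff (pairs : List (String × String)) (d : PySem.Dict String String) :
    checkLoop pairs d = true ↔
      ((∀ x ∈ pairs, ∀ v, d.get? x.1 = some v → x.2 = v) ∧ Consistent pairs) := by
  induction pairs generalizing d with
  | nil => simp [checkLoop, Consistent]
  | cons pr rest ih =>
    simp only [checkLoop]
    cases hget : d.get? pr.1 with
    | some v =>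
      by_cases hv : pr.2 = v
      · subst hv
        simp only [ne_eq, not_true_eq_false, if_false, ih]
        constructor
        · rintro ⟨hd, hc⟩
          refine ⟨?_, ?_⟩
          · intro x hx w hw
            rcases List.mem_cons.mp hx with hx | hx
            · rw [hx] at hw ⊢; rw [hget] at hw; exact Option.some_injective _ hw
            · exact hd x hx w hw
          · intro a ha b hb hab
            rcases List.mem_cons.mp ha with ha | ha <;> rcases List.mem_cons.mp hb with hb | hb
            · rw [ha, hb]
            · rw [ha]; rw [ha] at hab; exact (hd b hb pr.2 (by rw [← hab, hget])).symm
            · rw [hb]; rw [hb] at hab; exact hd a ha pr.2 (by rw [hab, hget])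
            · exact hc a ha b hb hab
        · rintro ⟨hd, hc⟩
          exact ⟨fun x hx w hw => hd x (by simp [hx]) w hw,
                 fun a ha b hb hab => hc a (by simp [ha]) b (by simp [hb]) hab⟩
      · simp only [ne_eq, hv, not_false_iff, if_true]
        constructor
        · intro h; cases h
        · rintro ⟨hd, _⟩
          exact absurd (hd pr (by simp) v (by rw [hget])) hv
    | none =>
      rw [ih]
      constructor
      · rintro ⟨hd, hc⟩
        refine ⟨?_, ?_⟩
        · intro x hx w hw
          rcases List.mem_cons.mp hx with hx | hx
          · rw [hx, hget] at hw; cases hw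
          · by_cases hk : x.1 = pr.1
            · rw [hk, hget] at hw; cases hw
            · refine hd x hx w ?_
              rw [PySem.Dict.get?_insert]
              simp [hk, hw]
        · intro a ha b hb hab
          rcases List.mem_cons.mp ha with ha | ha <;> rcases List.mem_cons.mp hb with hb | hb
          · rw [ha, hb]
          · rw [ha]; rw [ha] at hab
            exact (hd b hb pr.2 (by rw [← hab, PySem.Dict.get?_insert_self])).symm
          · rw [hb]; rw [hb] at hab
            exact hd a ha pr.2 (by rw [hab, PySem.Dict.get?_insert_self])
          · exact hc a ha b hb hab
      · rintro ⟨hd, hc⟩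
        refine ⟨?_, fun a ha b hb hab => hc a (by simp [ha]) b (by simp [hb]) hab⟩
        intro x hx w hw
        rw [PySem.Dict.get?_insert] at hw
        by_cases hk : x.1 = pr.1
        · rw [if_pos hk] at hw
          have hw2 : w = pr.2 := (Option.some_injective _ hw).symm
          subst hw2
          exact hc x (by simp [hx]) pr (by simp) hk
        · rw [if_neg hk] at hw
          exact hd x (by simp [hx]) w hw

lemma two_mem_of_len_le_one {l : List String} (h : (PySem.Set.ofList l).length ≤ 1)
    {x y : String} (hx : x ∈ l) (hy : y ∈ l) : x = y := by
  have hx' : x ∈ PySem.Set.ofList l := by rw [PySem.Set.mem_ofList]; exact hx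
  have hy' : y ∈ PySem.Set.ofList l := by rw [PySem.Set.mem_ofList]; exact hy
  cases hs : PySem.Set.ofList l with
  | nil => rw [hs] at hx'; cases hx'
  | cons a t =>
    rw [hs] at hx' hy' h
    simp at h
    subst h
    simp at hx' hy'
    rw [hx', hy']

lemma foldl_add_const {l : List String} {x : String} (h : ∀ y ∈ l, y = x) :
    l.foldl PySem.Set.add [x] = [x] := by
  induction l with
  | nil => rfl
  | cons a t ih =>
    have ha : a = x := h a (by simp)
    simp only [List.foldl_cons]
    have : PySem.Set.add [x] a = [x] := by
      rw [ha]; simp [PySem.Set.add, PySem.Set.contains]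
    rw [this]
    exact ih (fun y hy => h y (by simp [hy]))

lemma len_le_one_of_all_eq {l : List String} (h : ∀ x ∈ l, ∀ y ∈ l, x = y) :
    (PySem.Set.ofList l).length ≤ 1 := by
  cases l with
  | nil => simp [PySem.Set.ofList]
  | cons a t =>
    rw [PySem.Set.ofList_eq_foldl]
    simp only [List.foldl_cons]
    rw [show PySem.Set.add ([] : List String) a = [a] from rfl, foldl_add_const (fun y hy => h y (by simp [hy]) a (by simp))]
    simp

lemma alt_iff (pairs : List (String × String)) :
    (((groupVals pairs).values).all (fun vals => (PySem.Set.ofList vals).length ≤ 1)) = true ↔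
      Consistent pairs := by
  have hnd : (groupVals pairs).keys.Nodup :=
    PySem.Dict.nodup_keys_foldl_modify_key pairs Prod.fst [] (fun d pr => (· ++ [pr.2]))
      PySem.Dict.empty (by simp [PySem.Dict.keys_empty])
  have hkeys : (groupVals pairs).keys = PySem.Set.ofList (pairs.map Prod.fst) := by
    unfold groupVals
    rw [PySem.Dict.keys_foldl_modify_key]
    simp [PySem.Dict.keys_empty, PySem.Set.update, PySem.Set.ofList_eq_foldl]
  have hget : ∀ k, (groupVals pairs).getD k [] = (pairs.filter (fun pr => pr.1 == k)).map Prod.snd := by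
    intro k
    unfold groupVals
    rw [PySem.Dict.getD_foldl_modify_append]
    simp [PySem.Dict.getD_empty]
  rw [PySem.Dict.values_eq_map_keys _ hnd [], List.all_map, List.all_eq_true]
  constructor
  · intro h a ha b hb hab
    have hk : a.1 ∈ (groupVals pairs).keys := by
      rw [hkeys, PySem.Set.mem_ofList]
      exact List.mem_map_of_mem ha
    have := h a.1 hk
    simp only [Function.comp, hget] at this
    refine two_mem_of_len_le_one (by simpa using this) ?_ ?_
    · exact List.mem_map_of_mem (List.mem_filter.mpr ⟨ha, by simp⟩)
    · exact List.mem_map_of_mem (List.mem_filter.mpr ⟨hb, by simp [← hab]⟩)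
  · intro hc k _
    simp only [Function.comp, hget]
    refine decide_eq_true (len_le_one_of_all_eq ?_)
    intro x hx y hy
    rcases List.mem_map.mp hx with ⟨c, hcf, hcx⟩
    rcases List.mem_map.mp hy with ⟨c', hcf', hcy⟩
    rcases List.mem_filter.mp hcf with ⟨hc1, hc2⟩
    rcases List.mem_filter.mp hcf' with ⟨hc1', hc2'⟩
    rw [← hcx, ← hcy]
    exact hc c hc1 c' hc1' (by
      have := of_decide_eq_true hc2
      have := of_decide_eq_true hc2'
      simp_all)

-- ===== VERDICT (by name: the statement is the Claim_ definition above) =====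
theorem check_surjective_spec : Claim_equal_check_surjective := by
  intro p s _
  unfold Spec_check_surjective check_surjective check_surjective_alt
  rw [Bool.eq_iff_iff, checkLoop_iff, alt_iff]
  simp [PySem.Dict.get?_empty]
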